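-- pv_equiv track=rewrite | github.com/Auzzy/pystick | daikon/invariants/detect.py | var_order
-- ===== SOURCE A (Python) =====
-- from numbers import Number
--
-- comp_ops = {"lt": "<",
-- 	    "le": "<=",
-- 	    "gt": ">",
-- 	    "ge": ">=",
-- 	    "eq": "==",
-- 	    "ne": "!="}
--
-- def compare(order, var1, var2):
-- 	if order["eq"]:
-- 		return "eq"
-- 	elif order["le"]:
-- 		return "lt" if order["lt"] else "le"
-- 	elif order["ge"]:
-- 		return "gt" if order["gt"] else "ge"
-- 	elif order["ne"]:
-- 		return "ne"
--
-- def compare_values(val1, val2):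
-- 	return {"lt": val1<val2,
-- 		"le": val1<=val2,
-- 		"gt": val1>val2,
-- 		"ge": val1>=val2,
-- 		"eq": val1==val2,
-- 		"ne": val1!=val2}
--
-- def var_order(var1, var2, section):
-- 	order = dict.fromkeys(comp_ops.keys(),True)
-- 	for trace in section:
-- 		val1,val2 = trace[var1],trace[var2]
-- 		if isinstance(val1,Number) and isinstance(val2,Number):
-- 			comp = compare_values(val1,val2)
-- 			order = {op:order[op] and comp[op] for op in comp}
-- 		else:
-- 			return None
--
-- 	return compare(order,var1,var2)
-- ===== SOURCE B (Python) =====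
-- from numbers import Number
--
-- def var_order(var1, var2, section):
--     pairs = []
--     for trace in section:
--         v1, v2 = trace[var1], trace[var2]
--         if not (isinstance(v1, Number) and isinstance(v2, Number)):
--             return None
--         pairs.append((v1, v2))
--     if all(a == b for a, b in pairs):
--         return "eq"
--     if all(a <= b for a, b in pairs):
--         return "lt" if all(a < b for a, b in pairs) else "le"
--     if all(a >= b for a, b in pairs):
--         return "gt" if all(a > b for a, b in pairs) else "ge"
--     if all(a != b for a, b in pairs):
--         return "ne"
--     return None
-- ===== Notes on version B (the rewrite author's own statement) =====
-- stated objective: simpler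
-- what changed: Removes the per-trace accumulator entirely: B first extracts the value pairs, then decides the relation by a declarative early-return chain of all() predicates over the pairs, instead of A's single pass that rebuilds a six-flag dict per trace and then calls compare().
import Mathlib
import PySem

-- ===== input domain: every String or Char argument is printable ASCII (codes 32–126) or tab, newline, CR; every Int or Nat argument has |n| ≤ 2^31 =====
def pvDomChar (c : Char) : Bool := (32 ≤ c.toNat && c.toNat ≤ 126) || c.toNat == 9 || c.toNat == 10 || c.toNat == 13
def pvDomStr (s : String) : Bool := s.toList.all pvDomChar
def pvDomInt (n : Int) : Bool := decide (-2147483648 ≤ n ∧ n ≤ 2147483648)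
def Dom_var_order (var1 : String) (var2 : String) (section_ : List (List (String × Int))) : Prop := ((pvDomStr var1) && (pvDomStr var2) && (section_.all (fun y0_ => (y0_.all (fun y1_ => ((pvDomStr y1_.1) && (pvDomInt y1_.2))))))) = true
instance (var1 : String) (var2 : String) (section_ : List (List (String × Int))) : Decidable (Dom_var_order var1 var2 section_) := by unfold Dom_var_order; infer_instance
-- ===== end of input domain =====

-- B drops A's per-trace six-flag accumulator: it extracts the value pairs in one pass, then
-- classifies with a chain of all() predicates over the pairs (objective: simpler).


-- ===== PORT A =====
-- the six-flag dict 'order', as a structure with the same six Booleans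
structure POrder where
  lt : Bool
  le : Bool
  gt : Bool
  ge : Bool
  eq : Bool
  ne : Bool
deriving DecidableEq, Repr

def compare_values (val1 : Int) (val2 : Int) : POrder :=
  ⟨decide (val1 < val2), decide (val1 ≤ val2), decide (val1 > val2),
   decide (val1 ≥ val2), decide (val1 = val2), decide (val1 ≠ val2)⟩

def pvCompare (order : POrder) : Option String :=
  if order.eq then some "eq"
  else if order.le then (if order.lt then some "lt" else some "le")
  else if order.ge then (if order.gt then some "gt" else some "ge")
  else if order.ne then some "ne"
  else none

-- the loop 'for trace in section'; trace[var] is first-match lookup, none = KeyError (excluded by Pre_)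
def var_order_loop (var1 : String) (var2 : String) : List (List (String × Int)) → POrder → Option POrder
  | [], order => some order
  | trace :: rest, order =>
    match trace.lookup var1, trace.lookup var2 with
    | some val1, some val2 =>
      let comp := compare_values val1 val2
      var_order_loop var1 var2 rest
        ⟨order.lt && comp.lt, order.le && comp.le, order.gt && comp.gt,
         order.ge && comp.ge, order.eq && comp.eq, order.ne && comp.ne⟩
    | _, _ => none   -- KeyError in Python; outside Pre_

def var_order (var1 : String) (var2 : String) (section_ : List (List (String × Int))) : Option String :=
  match var_order_loop var1 var2 section_ ⟨true, true, true, true, true, true⟩ with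
  | some order => pvCompare order
  | none => none

-- ===== PORT B =====
-- Source B's extraction loop: collect the (val1,val2) pairs, none = KeyError (outside Pre_)
def var_order_alt_pairs (var1 : String) (var2 : String) : List (List (String × Int)) → Option (List (Int × Int))
  | [] => some []
  | trace :: rest =>
    match trace.lookup var1, trace.lookup var2 with
    | some val1, some val2 =>
      match var_order_alt_pairs var1 var2 rest with
      | some ps => some ((val1, val2) :: ps)
      | none => none
    | _, _ => none

def var_order_alt (var1 : String) (var2 : String) (section_ : List (List (String × Int))) : Option String :=
  match var_order_alt_pairs var1 var2 section_ with
  | none => none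
  | some pairs =>
    if pairs.all (fun p => decide (p.1 = p.2)) then some "eq"
    else if pairs.all (fun p => decide (p.1 ≤ p.2)) then
      (if pairs.all (fun p => decide (p.1 < p.2)) then some "lt" else some "le")
    else if pairs.all (fun p => decide (p.1 ≥ p.2)) then
      (if pairs.all (fun p => decide (p.1 > p.2)) then some "gt" else some "ge")
    else if pairs.all (fun p => decide (p.1 ≠ p.2)) then some "ne"
    else none

-- ===== PRECONDITION & SPEC =====
-- Pre_ excludes only inputs where Python A raises KeyError: a trace missing var1 or var2.
def Pre_var_order (var1 : String) (var2 : String) (section_ : List (List (String × Int))) : Prop :=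
  ∀ trace ∈ section_, (trace.lookup var1).isSome ∧ (trace.lookup var2).isSome
instance (var1 : String) (var2 : String) (section_ : List (List (String × Int))) : Decidable (Pre_var_order var1 var2 section_) := by unfold Pre_var_order; infer_instance
def pvWitness_var_order : String × String × (List (List (String × Int))) :=
  ("x", "y", [[("x", 1), ("y", 2)], [("x", 3), ("y", 3)]])
def Spec_var_order (var1 : String) (var2 : String) (section_ : List (List (String × Int))) (out : Option String) : Prop := out = var_order_alt var1 var2 section_
instance (var1 : String) (var2 : String) (section_ : List (List (String × Int))) (out : Option String) : Decidable (Spec_var_order var1 var2 section_ out) := by unfold Spec_var_order; infer_instance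

-- ===== CLAIM (what is proved, stated in full; the proofs are below) =====
def Claim_equal_var_order : Prop := ∀ (var1 : String) (var2 : String) (section_ : List (List (String × Int))), Dom_var_order var1 var2 section_ → Pre_var_order var1 var2 section_ → Spec_var_order var1 var2 section_ (var_order var1 var2 section_)

-- ===== LEMMAS AND PROOFS =====

-- A's loop computes, flag by flag, the AND of the incoming flag with all() of that comparison
-- over the pairs B extracts (and fails exactly when B's extraction fails).
theorem pv_loop_eq (var1 var2 : String) (sec : List (List (String × Int))) :
    ∀ order : POrder, var_order_loop var1 var2 sec order =
      match var_order_alt_pairs var1 var2 sec with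
      | none => none
      | some ps => some
          ⟨order.lt && ps.all (fun p => decide (p.1 < p.2)),
           order.le && ps.all (fun p => decide (p.1 ≤ p.2)),
           order.gt && ps.all (fun p => decide (p.1 > p.2)),
           order.ge && ps.all (fun p => decide (p.1 ≥ p.2)),
           order.eq && ps.all (fun p => decide (p.1 = p.2)),
           order.ne && ps.all (fun p => decide (p.1 ≠ p.2))⟩ := by
  induction sec with
  | nil => intro order; simp [var_order_loop, var_order_alt_pairs]
  | cons trace rest ih =>
    intro order
    cases e1 : trace.lookup var1 <;> cases e2 : trace.lookup var2 <;>
      simp [var_order_loop, var_order_alt_pairs, e1, e2, compare_values]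
    rw [ih]
    cases var_order_alt_pairs var1 var2 rest <;>
      simp [List.all_cons, Bool.and_assoc]

theorem var_order_spec : Claim_equal_var_order := by
  intro var1 var2 section_ _ _
  unfold Spec_var_order var_order var_order_alt
  rw [pv_loop_eq]
  cases var_order_alt_pairs var1 var2 section_ with
  | none => rfl
  | some ps => simp only [pvCompare, Bool.true_and]
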